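-- pv_equiv track=rewrite | github.com/FranciszekKalembiewicz/Studies_Sem4_Big_Data | Lab 1/Lab 1 Main.py | devider
-- ===== SOURCE A (Python) =====
-- def devider(n,list):
--     new_list = []
--     for j in range(n):
--         temp_list = []
--         for i in range(j, len(list), n):
--             temp_list.append(list[i])
--         new_list.append(temp_list)
--     return new_list
-- ===== SOURCE B (Python) =====
-- def devider(n, list):
--     buckets = [[] for _ in range(n)]
--     if n > 0:
--         for i, v in enumerate(list):
--             buckets[i % n].append(v)
--     return buckets
-- ===== Notes on version B (the rewrite author's own statement) =====
-- stated objective: alternative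
-- what changed: B deals elements out in a single enumerate pass, appending each element to bucket i % n, instead of A's per-residue inner stride scans over the index range.
import Mathlib
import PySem

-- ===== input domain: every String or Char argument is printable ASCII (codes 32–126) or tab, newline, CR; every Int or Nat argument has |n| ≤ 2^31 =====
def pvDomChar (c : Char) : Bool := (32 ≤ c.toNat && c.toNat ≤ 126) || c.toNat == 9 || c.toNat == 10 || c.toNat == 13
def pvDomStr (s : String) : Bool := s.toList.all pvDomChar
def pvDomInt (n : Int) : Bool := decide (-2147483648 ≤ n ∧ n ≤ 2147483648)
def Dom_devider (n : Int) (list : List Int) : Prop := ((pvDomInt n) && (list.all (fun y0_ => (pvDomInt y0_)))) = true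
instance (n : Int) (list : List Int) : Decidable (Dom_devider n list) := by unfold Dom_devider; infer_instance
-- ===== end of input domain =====

-- B distributes elements in one enumerate pass (deal-cards) instead of A's per-residue stride scans; same return value, no speed claim.

-- ===== PORT A =====
-- list[i] is always in range (j ≤ i < len(list)), so pyGetD's default is never used
def devider (n : Int) (list : List Int) : List (List Int) :=
  (PySem.List.pyRange 0 n 1).foldl
    (fun new_list j =>
      new_list ++ [(PySem.List.pyRange j (PySem.List.len list) n).foldl
          (fun temp_list i => temp_list ++ [PySem.List.pyGetD list i 0]) []])
    []

-- ===== PORT B =====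
-- buckets[i % n].append(v) becomes a functional set at index (i % n).toNat (i % n is nonnegative since n > 0)
def devider_alt (n : Int) (list : List Int) : List (List Int) :=
  let buckets := List.replicate n.toNat ([] : List Int)
  if 0 < n then
    (PySem.List.enumerate list).foldl
      (fun bs p =>
        bs.set (PySem.Int.mod p.1 n).toNat
          (bs.getD (PySem.Int.mod p.1 n).toNat [] ++ [p.2]))
      buckets
  else buckets

-- ===== PRECONDITION & SPEC =====
def Spec_devider (n : Int) (list : List Int) (out : List (List Int)) : Prop := out = devider_alt n list
instance (n : Int) (list : List Int) (out : List (List Int)) : Decidable (Spec_devider n list out) := by unfold Spec_devider; infer_instance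

-- ===== CLAIM (what is proved, stated in full; the proofs are below) =====
def Claim_equal_devider : Prop := ∀ (n : Int) (list : List Int), Dom_devider n list → Spec_devider n list (devider n list)

-- ===== LEMMAS AND PROOFS =====

lemma pairwise_lt_pyRange_pos (a b : Int) {s : Int} (hs : 0 < s) :
    (PySem.List.pyRange a b s).Pairwise (· < ·) := by
  rw [PySem.List.pyRange_of_pos a b hs]
  refine List.Pairwise.map _ (fun k₁ k₂ h => ?_) (List.pairwise_lt_range)
  have : s * (k₁ : Int) < s * (k₂ : Int) := by
    exact mul_lt_mul_of_pos_left (by exact_mod_cast h) hs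
  omega

-- the residue-j stride range is exactly the filter of all indices by residue
lemma stride_eq_filter (n j L : Int) (hn : 0 < n) (hj0 : 0 ≤ j) (hj : j < n) :
    PySem.List.pyRange j L n
      = (PySem.List.pyRange 0 L 1).filter (fun i => PySem.Int.mod i n == j) := by
  have h₁ : (PySem.List.pyRange j L n).Pairwise (· < ·) := pairwise_lt_pyRange_pos _ _ hn
  have h₂ : ((PySem.List.pyRange 0 L 1).filter (fun i => PySem.Int.mod i n == j)).Pairwise (· < ·) :=
    (PySem.List.pairwise_lt_pyRange_one 0 L).filter _
  refine List.Perm.eq_of_pairwise (fun a b _ _ hab hba => by omega) h₁ h₂ ?_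
  refine (List.perm_ext_iff_of_nodup h₁.nodup h₂.nodup).mpr (fun x => ?_)
  rw [List.mem_filter, PySem.List.mem_pyRange_iff_of_pos hn, PySem.List.mem_pyRange_one,
      PySem.Int.mod_eq_emod_of_pos hn]
  simp only [beq_iff_eq]
  constructor
  · rintro ⟨hjx, hxL, hdvd⟩
    have h0 : (x - j) % n = 0 := Int.emod_eq_zero_of_dvd hdvd
    have he : x % n = j % n := Int.emod_eq_emod_iff_emod_sub_eq_zero.mpr h0
    rw [Int.emod_eq_of_lt hj0 hj] at he
    exact ⟨⟨by omega, hxL⟩, he⟩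
  · rintro ⟨⟨hx0, hxL⟩, hm⟩
    have he : x % n = j % n := by rw [Int.emod_eq_of_lt hj0 hj]; exact hm
    have hdvd : n ∣ x - j :=
      Int.dvd_of_emod_eq_zero (Int.emod_eq_emod_iff_emod_sub_eq_zero.mp he)
    rcases hdvd with ⟨c, hc⟩
    have hc0 : 0 ≤ c := by nlinarith
    have hjx : j ≤ x := by nlinarith
    exact ⟨hjx, hxL, ⟨c, hc⟩⟩

-- A's inner per-residue loop collects exactly the elements whose index has residue j
lemma inner_eq (n : Int) (hn : 0 < n) (l : List Int) (j : Int) (hj0 : 0 ≤ j) (hj : j < n) :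
    (PySem.List.pyRange j (PySem.List.len l) n).foldl
        (fun temp_list i => temp_list ++ [PySem.List.pyGetD l i 0]) []
      = ((PySem.List.enumerate l).filter (fun p => PySem.Int.mod p.1 n == j)).map Prod.snd := by
  rw [PySem.List.foldl_append_singleton_eq_map, stride_eq_filter n j _ hn hj0 hj,
      PySem.List.enumerate_eq_map_pyRange l 0, List.filter_map, List.map_map]
  simp [PySem.List.len_eq, Function.comp_def]

lemma map_getD_range (bs : List (List Int)) :
    (List.range bs.length).map (fun j => bs.getD j []) = bs := by
  apply List.ext_getElem (by simp)
  intro i h1 h2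
  simp [List.getD_eq_getElem?_getD, List.getElem?_eq_getElem h2]

-- invariant of B's dealing loop
lemma deal_inv (n : Int) (hn : 0 < n) (l : List Int) : ∀ (s : Int), 0 ≤ s →
    ∀ (bs : List (List Int)), bs.length = n.toNat →
    (PySem.List.enumerate l s).foldl
        (fun bs p =>
          bs.set (PySem.Int.mod p.1 n).toNat
            (bs.getD (PySem.Int.mod p.1 n).toNat [] ++ [p.2])) bs
      = (List.range n.toNat).map
          (fun j => bs.getD j []
            ++ ((PySem.List.enumerate l s).filter
                  (fun p => PySem.Int.mod p.1 n == (j : Int))).map Prod.snd) := by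
  induction l with
  | nil =>
      intro s hs bs hbs
      rw [PySem.List.enumerate_nil]
      simp only [List.foldl_nil, List.filter_nil, List.map_nil, List.append_nil, ← hbs]
      exact (map_getD_range bs).symm
  | cons x l ih =>
      intro s hs bs hbs
      rw [PySem.List.enumerate_cons, List.foldl_cons]
      rw [ih (s + 1) (by omega) _ (by simp [hbs])]
      apply List.map_congr_left
      intro j hj
      rw [List.mem_range] at hj
      have hmn : PySem.Int.mod s n < n := PySem.Int.mod_lt s hn
      have hm0 : 0 ≤ PySem.Int.mod s n := PySem.Int.mod_nonneg s hn
      have hlt : (PySem.Int.mod s n).toNat < bs.length := by omega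
      rw [List.filter_cons]
      by_cases hcase : (PySem.Int.mod s n).toNat = j
      · have hbeq : (PySem.Int.mod s n == (j : Int)) = true := by
          simp only [beq_iff_eq]; omega
        subst hcase
        simp [List.getD_eq_getElem?_getD, List.getElem?_set_self hlt,
          List.append_assoc, Int.toNat_of_nonneg hm0]
      · have hbeq : (PySem.Int.mod s n == (j : Int)) = false := by
          simp only [beq_eq_false_iff_ne, ne_eq]; omega
        simp [hbeq, List.getD_eq_getElem?_getD,
          List.getElem?_set_ne (show (PySem.Int.mod s n).toNat ≠ j from hcase)]

-- ===== VERDICT (by name: the statement is the Claim_ definition above) =====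
theorem devider_spec : Claim_equal_devider := by
  intro n list _
  unfold Spec_devider devider devider_alt
  by_cases hn : 0 < n
  · simp only [hn, if_pos]
    rw [deal_inv n hn list 0 le_rfl _ (by simp)]
    rw [PySem.List.foldl_append_singleton_eq_map, PySem.List.pyRange_one, List.map_map]
    simp only [List.nil_append, Function.comp_def, zero_add, Int.sub_zero]
    apply List.map_congr_left
    intro j hj
    rw [List.mem_range] at hj
    have hj' : (j : Int) < n := by omega
    rw [inner_eq n hn list j (by positivity) hj']
    simp [List.getD_eq_getElem?_getD, hj]
  · have h1 : PySem.List.pyRange 0 n 1 = [] :=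
      PySem.List.pyRange_one_eq_nil (by omega)
    have h2 : n.toNat = 0 := by omega
    simp [h1, h2, hn]
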